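-- pv_equiv track=rewrite | github.com/arthexis/gway | projects/tome.py | _resolve_card_queries
-- ===== SOURCE A (Python) =====
-- from typing import Any, Iterable
--
-- def _resolve_card_identifier(cards: Iterable[str], identifier: str | None) -> str | None:
--     if identifier is None:
--         return None
--     normalized = identifier.strip()
--     if not normalized:
--         return None
--     card_list = list(cards)
--     if normalized.isdigit():
--         index = int(normalized) - 1
--         if 0 <= index < len(card_list):
--             return card_list[index]
--     normalized_upper = normalized.upper()
--     for card_id in card_list:
--         if card_id.upper() == normalized_upper:
--             return card_id
--     return None
--
-- def _resolve_card_queries(cards: list[str], queries: list[str]) -> tuple[list[str], list[str]]: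
--     remaining = list(cards)
--     resolved: list[str] = []
--     missing: list[str] = []
--     for query in queries:
--         target = _resolve_card_identifier(remaining, query)
--         if target:
--             resolved.append(target)
--             remaining.remove(target)
--         else:
--             missing.append(query)
--     return resolved, missing
-- ===== SOURCE B (Python) =====
-- def _resolve_card_queries(cards, queries):
--     """Resolve queries against the original card list using lazy deletion:
--     cards is never rebuilt; a tombstone array marks consumed cards, index
--     queries count alive entries and name queries scan alive entries."""
--     alive = [True] * len(cards)
--
--     def kth_alive_card(k):
--         for card, ok in zip(cards, alive):
--             if ok:
--                 if k == 0:
--                     return card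
--                 k -= 1
--         return None
--
--     def first_alive_named(name_upper):
--         for card, ok in zip(cards, alive):
--             if ok and card.upper() == name_upper:
--                 return card
--         return None
--
--     def consume(card):
--         for i, ok in enumerate(alive):
--             if ok and cards[i] == card:
--                 alive[i] = False
--                 return
--
--     resolved, missing = [], []
--     for query in queries:
--         q = query.strip()
--         card = None
--         if q.isdigit():
--             card = kth_alive_card(int(q) - 1)
--         if card is None and q:
--             card = first_alive_named(q.upper())
--         if card:
--             resolved.append(card)
--             consume(card)
--         else:
--             missing.append(query)
--     return resolved, missing
-- ===== Notes on version B (the rewrite author's own statement) =====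
-- stated objective: alternative
-- what changed: B never copies or mutates the card list: it keeps the original list with a boolean tombstone array, answers index queries by counting alive entries (order-statistics scan), name queries by scanning alive entries, and consumes a card by flagging the first alive equal entry instead of list.remove on a shrinking copy.
import Mathlib
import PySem

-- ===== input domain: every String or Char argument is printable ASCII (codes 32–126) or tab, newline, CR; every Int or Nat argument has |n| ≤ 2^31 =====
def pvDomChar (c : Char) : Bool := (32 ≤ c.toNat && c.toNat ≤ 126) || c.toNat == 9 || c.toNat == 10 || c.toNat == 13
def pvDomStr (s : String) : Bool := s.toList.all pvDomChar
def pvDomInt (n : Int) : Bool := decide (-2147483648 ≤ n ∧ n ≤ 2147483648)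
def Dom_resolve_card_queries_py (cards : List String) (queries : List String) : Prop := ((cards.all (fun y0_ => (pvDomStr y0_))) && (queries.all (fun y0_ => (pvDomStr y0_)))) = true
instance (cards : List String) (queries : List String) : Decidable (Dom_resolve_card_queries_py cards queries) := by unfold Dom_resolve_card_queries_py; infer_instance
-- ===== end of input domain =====

-- B replaces A's shrinking copy of the card list (per-query rebuild, find, list.remove)
-- by lazy deletion over the original list: a boolean tombstone array, an order-statistics
-- scan for index queries, and consumption by flagging (objective: alternative).

-- ===== PORT A =====
-- port of _resolve_card_identifier; the `identifier is None` branch is dropped (every call site passes a str)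
def resolve_card_identifier_py (cards : List String) (identifier : String) : Option String :=
  let normalized := PySem.Str.strip identifier
  if normalized = "" then none
  else
    let cardList := cards
    let byIndex : Option String :=
      if PySem.Str.strIsdigit normalized then
        -- int() on a digit-only string never raises, so the .getD default is unreachable
        let index := (PySem.Int.ofStr? normalized).getD 0 - 1
        if 0 ≤ index ∧ index < (cardList.length : Int) then
          PySem.List.pyGet? cardList index
        else none
      else none
    match byIndex with
    | some c => some c
    | none =>
      let normalizedUpper := PySem.Str.upper normalized
      cardList.find? (fun cardId => PySem.Str.upper cardId == normalizedUpper)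

-- loop body of A's `for query in queries` (state: remaining, resolved, missing)
def resolve_card_queries_py_step (st : List String × List String × List String)
    (query : String) : List String × List String × List String :=
  match resolve_card_identifier_py st.1 query with
  | some target =>
      if target ≠ "" then
        -- remaining.remove(target): target is an element of remaining, so remove? never fails
        ((PySem.List.remove? st.1 target).getD st.1, st.2.1 ++ [target], st.2.2)
      else (st.1, st.2.1, st.2.2 ++ [query])
  | none => (st.1, st.2.1, st.2.2 ++ [query])

def resolve_card_queries_py (cards : List String) (queries : List String) :
    List String × List String :=
  let final := queries.foldl resolve_card_queries_py_step (cards, ([], []))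
  (final.2.1, final.2.2)

-- ===== PORT B =====
-- kth_alive_card: walk zip(cards, alive), counting down k over alive entries
def pv_kth_alive_card : List String → List Bool → Int → Option String
  | c :: cs, a :: as, k =>
      if a then (if k = 0 then some c else pv_kth_alive_card cs as (k - 1))
      else pv_kth_alive_card cs as k
  | _, _, _ => none

-- first_alive_named: first alive card whose uppercase equals name_upper
def pv_first_alive_named (nameUpper : String) : List String → List Bool → Option String
  | c :: cs, a :: as =>
      if a && (PySem.Str.upper c == nameUpper) then some c
      else pv_first_alive_named nameUpper cs as
  | _, _ => none

-- consume: flag the first alive entry equal to card (mutation of `alive` as a rebuild)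
def pv_consume (card : String) : List String → List Bool → List Bool
  | c :: cs, a :: as =>
      if a && (c == card) then false :: as else a :: pv_consume card cs as
  | _, as => as

-- loop body of B's `for query in queries` (state: alive, resolved, missing)
def resolve_card_queries_py_alt_step (cards : List String)
    (st : List Bool × List String × List String) (query : String) :
    List Bool × List String × List String :=
  let q := PySem.Str.strip query
  let card0 : Option String :=
    if PySem.Str.strIsdigit q then
      pv_kth_alive_card cards st.1 ((PySem.Int.ofStr? q).getD 0 - 1)
    else none
  let card : Option String :=
    match card0 with
    | some c => some c
    | none => if q ≠ "" then pv_first_alive_named (PySem.Str.upper q) cards st.1 else none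
  match card with
  | some t =>
      if t ≠ "" then (pv_consume t cards st.1, st.2.1 ++ [t], st.2.2)
      else (st.1, st.2.1, st.2.2 ++ [query])
  | none => (st.1, st.2.1, st.2.2 ++ [query])

def resolve_card_queries_py_alt (cards : List String) (queries : List String) :
    List String × List String :=
  let final := queries.foldl (resolve_card_queries_py_alt_step cards)
    (List.replicate cards.length true, ([], []))
  (final.2.1, final.2.2)

-- ===== PRECONDITION & SPEC =====
def Spec_resolve_card_queries_py (cards : List String) (queries : List String) (out : List String × List String) : Prop := out = resolve_card_queries_py_alt cards queries
instance (cards : List String) (queries : List String) (out : List String × List String) : Decidable (Spec_resolve_card_queries_py cards queries out) := by unfold Spec_resolve_card_queries_py; infer_instance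

-- ===== CLAIM (what is proved, stated in full; the proofs are below) =====
def Claim_equal_resolve_card_queries_py : Prop := ∀ (cards : List String) (queries : List String), Dom_resolve_card_queries_py cards queries → Spec_resolve_card_queries_py cards queries (resolve_card_queries_py cards queries)

-- ===== LEMMAS AND PROOFS =====

-- the cards still alive, in original order: this is A's `remaining`
def pv_alive_filter : List String → List Bool → List String
  | c :: cs, a :: as => if a then c :: pv_alive_filter cs as else pv_alive_filter cs as
  | _, _ => []

-- B's card computation for one query, as a standalone term (proof bookkeeping only)
def pv_card_of (cards : List String) (alive : List Bool) (query : String) : Option String :=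
  let q := PySem.Str.strip query
  let card0 : Option String :=
    if PySem.Str.strIsdigit q then
      pv_kth_alive_card cards alive ((PySem.Int.ofStr? q).getD 0 - 1)
    else none
  match card0 with
  | some c => some c
  | none => if q ≠ "" then pv_first_alive_named (PySem.Str.upper q) cards alive else none

theorem pv_alive_filter_replicate (cs : List String) :
    pv_alive_filter cs (List.replicate cs.length true) = cs := by
  induction cs with
  | nil => rfl
  | cons c cs ih => simp [pv_alive_filter, List.replicate, ih]

-- counting down k over alive entries is indexing into the alive filter
theorem pv_kth_alive_card_eq (cs : List String) : ∀ (as : List Bool) (k : Int),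
    pv_kth_alive_card cs as k
      = if 0 ≤ k then (pv_alive_filter cs as)[k.toNat]? else none := by
  induction cs with
  | nil =>
    intro as k
    cases as <;> simp [pv_kth_alive_card, pv_alive_filter]
  | cons c cs ih =>
    intro as k
    cases as with
    | nil => simp [pv_kth_alive_card, pv_alive_filter]
    | cons a as =>
      cases a with
      | false => simp [pv_kth_alive_card, pv_alive_filter, ih]
      | true =>
        have hL : pv_kth_alive_card (c :: cs) (true :: as) k
            = if k = 0 then some c else pv_kth_alive_card cs as (k - 1) := by
          simp [pv_kth_alive_card]
        have hF : pv_alive_filter (c :: cs) (true :: as) = c :: pv_alive_filter cs as := by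
          simp [pv_alive_filter]
        rw [hL, hF, ih]
        by_cases hk : k = 0
        · subst hk; simp
        · rw [if_neg hk]
          by_cases h0 : 0 ≤ k
          · rw [if_pos (by omega), if_pos h0,
              show k.toNat = (k - 1).toNat + 1 from by omega, List.getElem?_cons_succ]
          · rw [if_neg (by omega), if_neg h0]

-- scanning alive entries for an uppercase match is find? on the alive filter
theorem pv_first_alive_named_eq (nu : String) (cs : List String) : ∀ (as : List Bool),
    pv_first_alive_named nu cs as
      = (pv_alive_filter cs as).find? (fun c => PySem.Str.upper c == nu) := by
  induction cs with
  | nil => intro as; cases as <;> rfl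
  | cons c cs ih =>
    intro as
    cases as with
    | nil => rfl
    | cons a as =>
      cases a with
      | false => simp [pv_first_alive_named, pv_alive_filter, ih]
      | true =>
        by_cases h : PySem.Str.upper c = nu
        · simp [pv_first_alive_named, pv_alive_filter, h]
        · simp [pv_first_alive_named, pv_alive_filter, h, ih]

-- flagging the first alive equal entry is list.remove on the alive filter
theorem pv_consume_eq (t : String) (cs : List String) : ∀ (as : List Bool),
    t ∈ pv_alive_filter cs as →
    PySem.List.remove? (pv_alive_filter cs as) t
      = some (pv_alive_filter cs (pv_consume t cs as)) := by
  induction cs with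
  | nil => intro as h; cases as <;> simp [pv_alive_filter] at h
  | cons c cs ih =>
    intro as h
    cases as with
    | nil => simp [pv_alive_filter] at h
    | cons a as =>
      cases a with
      | false =>
        simp only [pv_alive_filter, Bool.false_eq_true, if_neg, not_false_iff] at h ⊢
        rw [ih as h]
        simp [pv_consume, pv_alive_filter]
      | true =>
        simp only [pv_alive_filter, if_true] at h ⊢
        by_cases hc : c = t
        · subst hc
          simp [pv_consume, pv_alive_filter]
        · have hmem : t ∈ pv_alive_filter cs as := by
            rcases List.mem_cons.mp h with h1 | h1
            · exact absurd h1.symm hc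
            · exact h1
          rw [PySem.List.remove?_cons_of_ne _ hc, ih as hmem]
          simp [pv_consume, pv_alive_filter, hc]

-- A's per-query helper on the alive filter computes B's card
theorem pv_resolve_eq (cards : List String) (alive : List Bool) (query : String) :
    resolve_card_identifier_py (pv_alive_filter cards alive) query
      = pv_card_of cards alive query := by
  simp only [resolve_card_identifier_py, pv_card_of]
  by_cases hs : PySem.Str.strip query = ""
  · rw [hs]
    simp [show PySem.Chars.strIsdigit [] = false from rfl]
  · rw [if_neg hs]
    have hidx : (if PySem.Str.strIsdigit (PySem.Str.strip query) then
          (if 0 ≤ (PySem.Int.ofStr? (PySem.Str.strip query)).getD 0 - 1 ∧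
              (PySem.Int.ofStr? (PySem.Str.strip query)).getD 0 - 1
                < ((pv_alive_filter cards alive).length : Int) then
            PySem.List.pyGet? (pv_alive_filter cards alive)
              ((PySem.Int.ofStr? (PySem.Str.strip query)).getD 0 - 1)
          else none)
        else none)
        = (if PySem.Str.strIsdigit (PySem.Str.strip query) then
            pv_kth_alive_card cards alive ((PySem.Int.ofStr? (PySem.Str.strip query)).getD 0 - 1)
          else none) := by
      by_cases hd : PySem.Str.strIsdigit (PySem.Str.strip query)
      · rw [if_pos hd, if_pos hd, pv_kth_alive_card_eq]
        generalize (PySem.Int.ofStr? (PySem.Str.strip query)).getD 0 - 1 = K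
        by_cases h0 : 0 ≤ K
        · rw [if_pos h0]
          by_cases hlt : K < ((pv_alive_filter cards alive).length : Int)
          · rw [if_pos ⟨h0, hlt⟩]
            rw [show K = ((K.toNat : Nat) : Int) from by omega, PySem.List.pyGet?_natCast,
              Int.toNat_natCast]
          · rw [if_neg (by omega)]
            exact (List.getElem?_eq_none (by omega)).symm
        · rw [if_neg (by omega), if_neg h0]
      · rw [if_neg hd, if_neg hd]
    rw [hidx]
    cases hk : (if PySem.Str.strIsdigit (PySem.Str.strip query) then
        pv_kth_alive_card cards alive ((PySem.Int.ofStr? (PySem.Str.strip query)).getD 0 - 1)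
      else none) with
    | some t => rfl
    | none => simp [pv_first_alive_named_eq, hs]

-- a resolved card is an alive card
theorem pv_mem_of_card (cards : List String) (alive : List Bool) (query : String) (t : String)
    (h : pv_card_of cards alive query = some t) : t ∈ pv_alive_filter cards alive := by
  simp only [pv_card_of] at h
  by_cases hd : PySem.Str.strIsdigit (PySem.Str.strip query)
  · rw [if_pos hd] at h
    cases hk : pv_kth_alive_card cards alive
        ((PySem.Int.ofStr? (PySem.Str.strip query)).getD 0 - 1) with
    | some c =>
      rw [hk] at h
      cases h
      rw [pv_kth_alive_card_eq] at hk
      by_cases h0 : 0 ≤ (PySem.Int.ofStr? (PySem.Str.strip query)).getD 0 - 1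
      · rw [if_pos h0] at hk
        exact List.mem_of_getElem? hk
      · rw [if_neg h0] at hk
        exact absurd hk (by simp)
    | none =>
      rw [hk] at h
      by_cases hs : PySem.Str.strip query = ""
      · simp [hs] at h
      · rw [if_pos (by simpa using hs), pv_first_alive_named_eq] at h
        exact List.mem_of_find?_eq_some h
  · rw [if_neg hd] at h
    by_cases hs : PySem.Str.strip query = ""
    · simp [hs] at h
    · rw [if_pos (by simpa using hs), pv_first_alive_named_eq] at h
      exact List.mem_of_find?_eq_some h

-- one query: A's step on the alive filter is B's step followed by the alive filter
theorem pv_step_sim (cards : List String) (alive : List Bool) (res mis : List String)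
    (query : String) :
    resolve_card_queries_py_step (pv_alive_filter cards alive, res, mis) query
      = (pv_alive_filter cards
           (resolve_card_queries_py_alt_step cards (alive, res, mis) query).1,
         (resolve_card_queries_py_alt_step cards (alive, res, mis) query).2.1,
         (resolve_card_queries_py_alt_step cards (alive, res, mis) query).2.2) := by
  have hB : resolve_card_queries_py_alt_step cards (alive, res, mis) query
      = (match pv_card_of cards alive query with
         | some t =>
             if t ≠ "" then (pv_consume t cards alive, res ++ [t], mis)
             else (alive, res, mis ++ [query])
         | none => (alive, res, mis ++ [query])) := rfl
  rw [hB]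
  simp only [resolve_card_queries_py_step]
  rw [pv_resolve_eq]
  cases h : pv_card_of cards alive query with
  | none => rfl
  | some t =>
    by_cases ht : t = ""
    · simp [ht]
    · have hmem := pv_mem_of_card cards alive query t h
      simp [ht, pv_consume_eq t cards alive hmem]

-- the whole query loop, by induction with the alive-filter invariant
theorem pv_fold_sim (cards : List String) : ∀ (queries : List String)
    (alive : List Bool) (res mis : List String),
    queries.foldl resolve_card_queries_py_step (pv_alive_filter cards alive, res, mis)
      = (pv_alive_filter cards
           (queries.foldl (resolve_card_queries_py_alt_step cards) (alive, res, mis)).1,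
         (queries.foldl (resolve_card_queries_py_alt_step cards) (alive, res, mis)).2.1,
         (queries.foldl (resolve_card_queries_py_alt_step cards) (alive, res, mis)).2.2) := by
  intro queries
  induction queries with
  | nil => intro alive res mis; rfl
  | cons q qs ih =>
    intro alive res mis
    rw [List.foldl_cons, List.foldl_cons, pv_step_sim, ih]

-- ===== VERDICT (by name: the statement is the Claim_ definition above) =====
theorem resolve_card_queries_py_spec : Claim_equal_resolve_card_queries_py := by
  intro cards queries _
  simp only [Spec_resolve_card_queries_py, resolve_card_queries_py, resolve_card_queries_py_alt]
  have h := pv_fold_sim cards queries (List.replicate cards.length true) [] []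
  rw [pv_alive_filter_replicate] at h
  rw [h]
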